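-- pv_equiv track=rewrite | github.com/bfat-ux/nigeria-pharmacy-registry | agent-07-integration/enum_contract_check.py | extract_openapi_domain_enum
-- ===== SOURCE A (Python) =====
-- def extract_openapi_domain_enum(openapi_enums: list[set[str]], domain_values: set[str], domain_name: str) -> set[str]:
--     candidates: list[set[str]] = []
--     for enum_values in openapi_enums:
--         overlap = enum_values & domain_values
--         if overlap:
--             candidates.append(enum_values)
--
--     exact_matches = [e for e in candidates if e == domain_values]
--     if exact_matches:
--         return exact_matches[0]
--
--     if candidates:
--         # Provide the most relevant candidate in error messaging.
--         largest_overlap = max(candidates, key=lambda e: len(e & domain_values))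
--         raise ValueError(
--             f"OpenAPI {domain_name} enum mismatch. "
--             f"Expected {sorted(domain_values)}, found {sorted(largest_overlap)}"
--         )
--
--     raise ValueError(f"Could not find OpenAPI enum for domain '{domain_name}'")
-- ===== SOURCE B (Python) =====
-- def extract_openapi_domain_enum(openapi_enums: list[set[str]], domain_values: set[str], domain_name: str) -> set[str]:
--     best = None
--     best_overlap = 0
--     for enum_values in openapi_enums:
--         overlap = enum_values & domain_values
--         if not overlap:
--             continue
--         if enum_values == domain_values:
--             return enum_values
--         if len(overlap) > best_overlap:
--             best = enum_values
--             best_overlap = len(overlap)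
--     if best is not None:
--         raise ValueError(
--             f"OpenAPI {domain_name} enum mismatch. "
--             f"Expected {sorted(domain_values)}, found {sorted(best)}"
--         )
--     raise ValueError(f"Could not find OpenAPI enum for domain '{domain_name}'")
-- ===== Notes on version B (the rewrite author's own statement) =====
-- stated objective: simpler
-- what changed: Replaces A's three passes (collect candidates, filter exact matches, max-by-overlap) with one loop over openapi_enums that returns immediately on the first exactly-matching candidate while tracking the best-overlap candidate for the error message.
import Mathlib
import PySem

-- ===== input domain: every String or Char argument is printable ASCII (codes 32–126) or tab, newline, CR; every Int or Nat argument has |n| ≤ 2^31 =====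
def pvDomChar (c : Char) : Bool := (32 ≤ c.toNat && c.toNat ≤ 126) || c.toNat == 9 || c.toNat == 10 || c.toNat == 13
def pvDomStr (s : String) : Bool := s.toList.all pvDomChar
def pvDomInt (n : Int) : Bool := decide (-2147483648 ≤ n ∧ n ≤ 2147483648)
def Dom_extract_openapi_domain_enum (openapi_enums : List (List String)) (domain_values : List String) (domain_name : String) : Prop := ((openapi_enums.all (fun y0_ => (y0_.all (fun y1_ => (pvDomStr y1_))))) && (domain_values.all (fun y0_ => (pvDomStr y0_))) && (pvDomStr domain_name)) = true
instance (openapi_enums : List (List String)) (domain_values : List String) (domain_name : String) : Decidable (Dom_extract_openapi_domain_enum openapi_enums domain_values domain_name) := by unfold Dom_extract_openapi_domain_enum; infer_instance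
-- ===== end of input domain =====

-- ===== PORT A =====
-- Header: B fuses A's three passes (collect candidates / filter exact matches / pick max overlap)
-- into one loop with an early return and a running best candidate; objective: simpler.
-- Both programs only RETURN on an exact match; all other inputs raise ValueError and are excluded by Pre_.
def extract_openapi_domain_enum (openapi_enums : List (List String)) (domain_values : List String) (domain_name : String) : List String :=
  -- candidates = [e for e in openapi_enums if e & domain_values]
  let candidates := openapi_enums.filter (fun e => !(PySem.Set.inter e domain_values).isEmpty)
  -- exact_matches = [e for e in candidates if e == domain_values]
  let exact_matches := candidates.filter (fun e => PySem.Set.equal e domain_values)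
  match exact_matches with
  | x :: _ => x          -- return exact_matches[0]
  | [] => []             -- both remaining branches raise ValueError (outside Pre_)

-- ===== PORT B =====
-- single loop carrying the best-overlap candidate (used only by the error message, i.e. outside Pre_)
def pvAltLoop (domain_values : List String) (best : Option (List String)) (best_overlap : Nat) : List (List String) → List String
  | [] => []             -- both raise branches after the loop (outside Pre_)
  | e :: rest =>
    let overlap := PySem.Set.inter e domain_values
    if overlap.isEmpty then pvAltLoop domain_values best best_overlap rest
    else if PySem.Set.equal e domain_values then e
    else if overlap.length > best_overlap then pvAltLoop domain_values (some e) overlap.length rest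
    else pvAltLoop domain_values best best_overlap rest

def extract_openapi_domain_enum_alt (openapi_enums : List (List String)) (domain_values : List String) (domain_name : String) : List String :=
  pvAltLoop domain_values none 0 openapi_enums

-- ===== PRECONDITION & SPEC =====
-- Pre_ holds exactly when A returns: some enum is set-equal to a nonempty domain_values;
-- on all other inputs both Pythons raise ValueError.
def Pre_extract_openapi_domain_enum (openapi_enums : List (List String)) (domain_values : List String) (domain_name : String) : Prop :=
  domain_values ≠ [] ∧ ∃ e ∈ openapi_enums, (∀ x ∈ e, x ∈ domain_values) ∧ (∀ x ∈ domain_values, x ∈ e)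
instance (openapi_enums : List (List String)) (domain_values : List String) (domain_name : String) : Decidable (Pre_extract_openapi_domain_enum openapi_enums domain_values domain_name) := by unfold Pre_extract_openapi_domain_enum; infer_instance

def pvWitness_extract_openapi_domain_enum : List (List String) × List String × String := ([["a"], ["b", "c"]], ["a"], "status")

def Spec_extract_openapi_domain_enum (openapi_enums : List (List String)) (domain_values : List String) (domain_name : String) (out : List String) : Prop := out = extract_openapi_domain_enum_alt openapi_enums domain_values domain_name
instance (openapi_enums : List (List String)) (domain_values : List String) (domain_name : String) (out : List String) : Decidable (Spec_extract_openapi_domain_enum openapi_enums domain_values domain_name out) := by unfold Spec_extract_openapi_domain_enum; infer_instance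

-- ===== CLAIM (what is proved, stated in full; the proofs are below) =====
def Claim_equal_extract_openapi_domain_enum : Prop := ∀ (openapi_enums : List (List String)) (domain_values : List String) (domain_name : String), Dom_extract_openapi_domain_enum openapi_enums domain_values domain_name → Pre_extract_openapi_domain_enum openapi_enums domain_values domain_name → Spec_extract_openapi_domain_enum openapi_enums domain_values domain_name (extract_openapi_domain_enum openapi_enums domain_values domain_name)

-- ===== LEMMAS AND PROOFS =====
-- The loop of B returns the first enum with nonempty overlap that is set-equal to
-- domain_values (and [] if none), independently of the carried best state; that is
-- exactly the head of A's doubly-filtered list.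
theorem pvAltLoop_eq (domain_values : List String) (enums : List (List String)) :
    ∀ best best_overlap, pvAltLoop domain_values best best_overlap enums =
      ((enums.filter (fun e => !(PySem.Set.inter e domain_values).isEmpty)).filter
        (fun e => PySem.Set.equal e domain_values)).headD [] := by
  induction enums with
  | nil => intro best bo; simp [pvAltLoop]
  | cons e rest ih =>
    intro best bo
    simp only [pvAltLoop, List.filter_cons]
    by_cases h1 : (PySem.Set.inter e domain_values).isEmpty
    · simp [h1, ih]
    · by_cases h2 : PySem.Set.equal e domain_values
      · simp [h1, h2]
      · by_cases h3 : (PySem.Set.inter e domain_values).length > bo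
        · simp [h1, h2, h3, ih]
        · simp [h1, h2, h3, ih]

-- ===== VERDICT (by name: the statement is the Claim_ definition above) =====
theorem extract_openapi_domain_enum_spec : Claim_equal_extract_openapi_domain_enum := by
  intro enums dv name _ _
  unfold Spec_extract_openapi_domain_enum extract_openapi_domain_enum extract_openapi_domain_enum_alt
  rw [pvAltLoop_eq]
  cases h : (enums.filter (fun e => !(PySem.Set.inter e dv).isEmpty)).filter (fun e => PySem.Set.equal e dv) <;> simp [h]
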